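-- pv_equiv track=rewrite | github.com/dwd/Polymer | infotrope/iquopri.py | encode_iquopri
-- ===== SOURCE A (Python) =====
-- def encode_iquopri( foo, errors = 'strict' ):
--     out = ''
--     lc = 0
--     for c in foo:
--         if c.isalnum() or c in '\'"!$%^&*()_-+[]#~@;:/?.>,<\\|`':
--             if lc > 76:
--                 out += '=\n'
--                 lc = 0
--             out += c
--             lc += 1
--         elif c=='\n':
--             lc = 0
--             out += '\n'
--         elif c!='\r':
--             if lc > 76:
--                 out += '=\n'
--                 lc = 0
--             out += '=%2.2X' % ord(c)
--             lc += 3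
--     return out
-- ===== SOURCE B (Python) =====
-- def encode_iquopri(foo, errors='strict'):
--     # Phase 1: tokenize (skip '\r'; None = hard newline; else (text, cost))
--     tokens = []
--     for c in foo:
--         if c == '\r':
--             continue
--         if c == '\n':
--             tokens.append(None)
--         elif c.isalnum() or c in '\'"!$%^&*()_-+[]#~@;:/?.>,<\\|`':
--             tokens.append((c, 1))
--         else:
--             tokens.append(('=%2.2X' % ord(c), 3))
--     # Phase 2: emit with soft-wrap accounting, join once
--     pieces = []
--     lc = 0
--     for t in tokens:
--         if t is None:
--             pieces.append('\n')
--             lc = 0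
--         else:
--             s, cost = t
--             if lc > 76:
--                 pieces.append('=\n')
--                 lc = 0
--             pieces.append(s)
--             lc += cost
--     return ''.join(pieces)
-- ===== Notes on version B (the rewrite author's own statement) =====
-- stated objective: alternative
-- what changed: Split the single stateful encode loop into a tokenize phase (skip CR, classify each char into hard-newline or a content token with text and line cost) and an emit phase that does the soft-wrap accounting over tokens, joining the pieces once instead of repeated string +=.
import Mathlib
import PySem

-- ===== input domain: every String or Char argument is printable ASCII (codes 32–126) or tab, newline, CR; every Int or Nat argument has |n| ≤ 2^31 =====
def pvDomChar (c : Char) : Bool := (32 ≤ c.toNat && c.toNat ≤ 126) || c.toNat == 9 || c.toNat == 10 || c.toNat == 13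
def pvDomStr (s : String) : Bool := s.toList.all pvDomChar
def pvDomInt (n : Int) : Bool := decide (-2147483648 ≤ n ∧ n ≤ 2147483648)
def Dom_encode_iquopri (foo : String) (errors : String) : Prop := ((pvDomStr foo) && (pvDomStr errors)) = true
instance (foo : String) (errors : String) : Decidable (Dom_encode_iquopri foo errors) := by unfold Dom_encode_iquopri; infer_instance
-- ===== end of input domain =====

-- B re-decomposes A's single stateful encode loop into a tokenize phase plus an
-- emit/soft-wrap phase joined once (alternative decomposition; same cost).


-- ===== PORT A =====
-- shared literal helpers: the special-character set and '=%2.2X' % ord(c)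
def pvSpecials : List Char := "'\"!$%^&*()_-+[]#~@;:/?.>,<\\|`".toList

def pvIsSafe (c : Char) : Bool := c.isAlphanum || pvSpecials.contains c

def pvHexDigit (n : Nat) : Char := if n < 10 then Char.ofNat (48 + n) else Char.ofNat (55 + n)

-- "=%2.2X" % ord(c) (exact for ord(c) < 256, always the case on Dom)
def pvHexStr (n : Nat) : String := String.mk ['=', pvHexDigit (n / 16 % 16), pvHexDigit (n % 16)]

def pvAStep (st : String × Int) (c : Char) : String × Int :=
  match st with
  | (out, lc) =>
    if pvIsSafe c then
      if lc > 76 then (out ++ "=\n" ++ String.mk [c], 1)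
      else (out ++ String.mk [c], lc + 1)
    else if c = '\n' then (out ++ "\n", 0)
    else if c ≠ '\r' then
      if lc > 76 then (out ++ "=\n" ++ pvHexStr c.toNat, 3)
      else (out ++ pvHexStr c.toNat, lc + 3)
    else (out, lc)

def encode_iquopri (foo : String) (errors : String) : String :=
  (foo.toList.foldl pvAStep ("", 0)).1

-- ===== PORT B =====
-- a token: none = hard newline, some (text, line cost) = content
def pvTok (c : Char) : Option (String × Int) :=
  if c = '\n' then none
  else if pvIsSafe c then some (String.mk [c], 1)
  else some (pvHexStr c.toNat, 3)

def pvBStep (st : List String × Int) (t : Option (String × Int)) : List String × Int :=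
  match st, t with
  | (ps, _), none => (ps ++ ["\n"], 0)
  | (ps, lc), some (s, cost) =>
    if lc > 76 then (ps ++ ["=\n"] ++ [s], cost)
    else (ps ++ [s], lc + cost)

def encode_iquopri_alt (foo : String) (errors : String) : String :=
  String.join (((foo.toList.filterMap (fun c => if c = '\r' then none else some (pvTok c))).foldl pvBStep ([], 0)).1)

-- ===== PRECONDITION & SPEC =====
def Spec_encode_iquopri (foo : String) (errors : String) (out : String) : Prop := out = encode_iquopri_alt foo errors
instance (foo : String) (errors : String) (out : String) : Decidable (Spec_encode_iquopri foo errors out) := by unfold Spec_encode_iquopri; infer_instance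

-- ===== CLAIM (what is proved, stated in full; the proofs are below) =====
def Claim_equal_encode_iquopri : Prop := ∀ (foo : String) (errors : String), Dom_encode_iquopri foo errors → Spec_encode_iquopri foo errors (encode_iquopri foo errors)

-- ===== LEMMAS AND PROOFS =====

-- proof-side recursive emitter: the pieces phase 2 appends for a token list at line count lc
def pvEmit (lc : Int) : List (Option (String × Int)) → List String
  | [] => []
  | none :: ts => "\n" :: pvEmit 0 ts
  | some (s, cost) :: ts =>
    if lc > 76 then "=\n" :: s :: pvEmit cost ts
    else s :: pvEmit (lc + cost) ts

theorem pvBfold (ts : List (Option (String × Int))) : ∀ (ps : List String) (lc : Int),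
    (ts.foldl pvBStep (ps, lc)).1 = ps ++ pvEmit lc ts := by
  induction ts with
  | nil => intro ps lc; simp [pvEmit]
  | cons t ts ih =>
    intro ps lc
    match t with
    | none => simp [pvBStep, pvEmit, ih]
    | some (s, cost) =>
      by_cases h : lc > 76 <;> simp [pvBStep, pvEmit, h, ih]

theorem pvFoldlAppend (l : List String) : ∀ (s : String),
    l.foldl (fun r t => r ++ t) s = s ++ l.foldl (fun r t => r ++ t) "" := by
  induction l with
  | nil => intro s; simp
  | cons a l ih =>
    intro s
    simp only [List.foldl]
    rw [ih (s ++ a), ih ("" ++ a)]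
    simp [String.append_assoc]

theorem pvJoinCons (s : String) (l : List String) : String.join (s :: l) = s ++ String.join l := by
  simp only [String.join, List.foldl]
  rw [show ("" : String) ++ s = s by simp, pvFoldlAppend]

theorem pvAfold (cs : List Char) : ∀ (out : String) (lc : Int),
    (cs.foldl pvAStep (out, lc)).1
      = out ++ String.join (pvEmit lc (cs.filterMap (fun c => if c = '\r' then none else some (pvTok c)))) := by
  induction cs with
  | nil => intro out lc; simp [pvEmit, String.join]
  | cons c cs ih =>
    intro out lc
    by_cases hr : c = '\r'
    · subst hr
      simp [pvAStep, (by decide : pvIsSafe '\r' = false), ih]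
    · by_cases hs : pvIsSafe c
      · have hnl : c ≠ '\n' := by
          intro h; subst h; exact absurd hs (by decide)
        by_cases h76 : lc > 76 <;>
          simp [pvAStep, pvTok, pvEmit, hr, hs, hnl, h76, ih, pvJoinCons, String.append_assoc]
      · by_cases hnl : c = '\n'
        · subst hnl
          simp [pvAStep, pvTok, pvEmit, (by decide : pvIsSafe '\n' = false),
            (by decide : ('\n' : Char) ≠ '\r'), ih, pvJoinCons, String.append_assoc]
        · by_cases h76 : lc > 76 <;>
            simp [pvAStep, pvTok, pvEmit, hr, hs, hnl, h76, ih, pvJoinCons, String.append_assoc]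

-- ===== VERDICT (by name: the statement is the Claim_ definition above) =====
theorem encode_iquopri_spec : Claim_equal_encode_iquopri := by
  intro foo errors _
  unfold Spec_encode_iquopri encode_iquopri encode_iquopri_alt
  rw [pvAfold, pvBfold]
  simp
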